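-- pv_equiv track=rewrite | github.com/CAIDA/bdrmapit | traceroute/parser_pool.py | remove_loops
-- ===== SOURCE A (Python) =====
-- def remove_loops(hopslist):
--     seen = set()
--     previous = None
--     end = 0
--     for i, hop in enumerate(reversed(hopslist), 1):
--         addr = hop['addr']
--         if addr != previous:
--             if addr in seen:
--                 end = i-1
--             previous = addr
--             seen.add(addr)
--     return hopslist[:len(hopslist)-end]
-- ===== SOURCE B (Python) =====
-- def remove_loops(hopslist):
--     # Pass 1: collapse consecutive duplicate addrs over the reversed list and
--     # index each distinct run's (1-based) position per address.
--     byaddr = {}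
--     previous = None
--     for i, hop in enumerate(reversed(hopslist), 1):
--         addr = hop['addr']
--         if addr == previous:
--             continue
--         byaddr.setdefault(addr, []).append(i)
--         previous = addr
--     # Pass 2: the truncation point is the last run-start of any revisited address.
--     end = max((idxs[-1] for idxs in byaddr.values() if len(idxs) > 1), default=1) - 1
--     return hopslist[:len(hopslist)-end]
-- ===== Notes on version B (the rewrite author's own statement) =====
-- stated objective: alternative
-- what changed: Instead of tracking a seen-set and updating the truncation point inline, B first builds a per-address table of distinct-run positions over the reversed list, then derives the cut as max of the last position of every revisited address (default 1) minus 1.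
import Mathlib
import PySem

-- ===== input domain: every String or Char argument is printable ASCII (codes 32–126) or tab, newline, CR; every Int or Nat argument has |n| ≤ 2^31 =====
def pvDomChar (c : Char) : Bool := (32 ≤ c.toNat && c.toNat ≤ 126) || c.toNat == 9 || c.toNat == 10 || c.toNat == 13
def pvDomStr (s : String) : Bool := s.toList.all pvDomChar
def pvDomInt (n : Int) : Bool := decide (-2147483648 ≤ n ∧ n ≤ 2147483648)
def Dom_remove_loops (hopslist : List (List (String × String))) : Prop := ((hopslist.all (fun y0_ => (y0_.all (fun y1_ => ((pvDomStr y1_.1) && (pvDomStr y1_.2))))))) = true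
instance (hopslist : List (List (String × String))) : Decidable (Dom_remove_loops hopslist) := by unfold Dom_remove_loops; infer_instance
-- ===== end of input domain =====

-- B builds a per-address table of run positions first and derives the cut from it afterwards,
-- instead of A's inline seen-set/end updates (alternative decomposition, same cost).


-- ===== PORT A =====
-- hop['addr']: total form getD "" is exact under Pre_ (every hop contains the key "addr")
def pvAddr (hop : List (String × String)) : String :=
  PySem.Dict.getD (PySem.Dict.mk hop) "addr" ""

-- one iteration of A's loop; state = (seen, previous, end)
def pvStepA (st : PySem.Set String × Option String × Int) (p : Int × List (String × String)) :
    PySem.Set String × Option String × Int :=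
  let addr := pvAddr p.2
  if some addr ≠ st.2.1 then
    (PySem.Set.add st.1 addr, some addr,
      if PySem.Set.contains st.1 addr then p.1 - 1 else st.2.2)
  else st

def remove_loops (hopslist : List (List (String × String))) : List (List (String × String)) :=
  let st := (PySem.List.enumerate hopslist.reverse 1).foldl pvStepA (PySem.Set.empty, none, 0)
  PySem.List.slice hopslist none (some ((hopslist.length : Int) - st.2.2))

-- ===== PORT B =====
-- one iteration of B's first loop; state = (byaddr, previous)
def pvStepB (st : PySem.Dict String (List Int) × Option String) (p : Int × List (String × String)) :
    PySem.Dict String (List Int) × Option String :=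
  let addr := pvAddr p.2
  if some addr = st.2 then st
  else (PySem.Dict.modify st.1 addr [] (· ++ [p.1]), some addr)

-- B's second pass: max(idxs[-1] for idxs in byaddr.values() if len(idxs) > 1, default=1) - 1
def pvCalcEnd (d : PySem.Dict String (List Int)) : Int :=
  (PySem.List.max?
    (((d.values.filter (fun idxs => decide (1 < idxs.length))).map
        (fun idxs => PySem.List.pyGetD idxs (-1) 0)))
    (fun x => x)).getD 1 - 1

def remove_loops_alt (hopslist : List (List (String × String))) : List (List (String × String)) :=
  let st := (PySem.List.enumerate hopslist.reverse 1).foldl pvStepB (PySem.Dict.empty, none)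
  let endv := pvCalcEnd st.1
  PySem.List.slice hopslist none (some ((hopslist.length : Int) - endv))

-- ===== PRECONDITION & SPEC =====
-- Pre_: every hop carries the key 'addr'; otherwise A raises KeyError (returns no value).
def Pre_remove_loops (hopslist : List (List (String × String))) : Prop :=
  (hopslist.all (fun hop => PySem.Dict.contains (PySem.Dict.mk hop) "addr")) = true
instance (hopslist : List (List (String × String))) : Decidable (Pre_remove_loops hopslist) := by
  unfold Pre_remove_loops; infer_instance

def pvWitness_remove_loops : (List (List (String × String))) :=
  [[("addr", "a")], [("addr", "b")], [("addr", "a")], [("addr", "c")]]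

def Spec_remove_loops (hopslist : List (List (String × String))) (out : List (List (String × String))) : Prop := out = remove_loops_alt hopslist
instance (hopslist : List (List (String × String))) (out : List (List (String × String))) : Decidable (Spec_remove_loops hopslist out) := by unfold Spec_remove_loops; infer_instance

-- ===== CLAIM (what is proved, stated in full; the proofs are below) =====
def Claim_equal_remove_loops : Prop := ∀ (hopslist : List (List (String × String))), Dom_remove_loops hopslist → Pre_remove_loops hopslist → Spec_remove_loops hopslist (remove_loops hopslist)

-- ===== LEMMAS AND PROOFS =====

-- the invariant tying A's state to B's state after processing the same prefix,
-- i being the next 1-based index to be processed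
def pvInv (stA : PySem.Set String × Option String × Int)
    (stB : PySem.Dict String (List Int) × Option String) (i : Int) : Prop :=
  stB.2 = stA.2.1 ∧ stA.1 = stB.1.keys ∧ stA.2.2 = pvCalcEnd stB.1 ∧ stB.1.keys.Nodup ∧
  (∀ idxs ∈ stB.1.values, idxs ≠ [] ∧ ∀ j ∈ idxs, j < i)

theorem pvInv_step (stA : PySem.Set String × Option String × Int)
    (stB : PySem.Dict String (List Int) × Option String) (i : Int)
    (hop : List (String × String)) (h : pvInv stA stB i) :
    pvInv (pvStepA stA (i, hop)) (pvStepB stB (i, hop)) (i + 1) := by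
  obtain ⟨seen, prevA, endA⟩ := stA
  obtain ⟨d, prevB⟩ := stB
  obtain ⟨hprev, hkeys, hend, hnd, hvals⟩ := h
  simp only at hprev hkeys hend hnd hvals ⊢
  by_cases hpe : some (pvAddr hop) = prevA
  · have hA : pvStepA (seen, prevA, endA) (i, hop) = (seen, prevA, endA) := by
      simp [pvStepA, hpe]
    have hB : pvStepB (d, prevB) (i, hop) = (d, prevB) := by
      simp [pvStepB, hprev, hpe]
    rw [hA, hB]
    exact ⟨hprev, hkeys, hend, hnd, fun idxs hm =>
      ⟨(hvals idxs hm).1, fun j hj => by have := (hvals idxs hm).2 j hj; omega⟩⟩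
  · have hA : pvStepA (seen, prevA, endA) (i, hop) =
        (PySem.Set.add seen (pvAddr hop), some (pvAddr hop),
          if PySem.Set.contains seen (pvAddr hop) then i - 1 else endA) := by
      simp [pvStepA, hpe]
    have hB : pvStepB (d, prevB) (i, hop) =
        (d.insert (pvAddr hop) (d.getD (pvAddr hop) [] ++ [i]), some (pvAddr hop)) := by
      simp [pvStepB, PySem.Dict.modify, hprev, hpe]
    rw [hA, hB]
    have hsc : PySem.Set.contains seen (pvAddr hop) = d.contains (pvAddr hop) := by
      rw [hkeys, PySem.Dict.contains_eq_decide_mem_keys]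
      simp [PySem.Set.contains]
    set a := pvAddr hop with ha
    by_cases hc : d.contains a = true
    · -- revisited address: the cut moves to i - 1
      obtain ⟨w, hw⟩ : ∃ w, d.get? a = some w := by
        have := PySem.Dict.contains_eq_isSome_get? d a
        rw [hc] at this
        exact Option.isSome_iff_exists.1 this.symm
      have hgd : d.getD a [] = w := by rw [PySem.Dict.getD_eq_get?_getD, hw]; rfl
      have hwitems : (a, w) ∈ d.items := by apply PySem.Dict.mem_items_of_get?_eq_some; exact hw
      have hwvals : w ∈ d.values := by
        simp only [PySem.Dict.values, List.mem_map]
        exact ⟨(a, w), hwitems, rfl⟩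
      obtain ⟨hwne, hwlt⟩ := hvals w hwvals
      set v : List Int := d.getD a [] ++ [i] with hv
      set d' := d.insert a v with hd'
      have hvmem : v ∈ d'.values := by
        simp only [PySem.Dict.values, List.mem_map]
        exact ⟨(a, v), PySem.Dict.mem_items_insert_self d a v, rfl⟩
      have hvlen : decide (1 < v.length) = true := by
        rw [hv, hgd]
        have : 0 < w.length := List.length_pos_iff.2 hwne
        simp
        omega
      set cands := ((d'.values.filter (fun idxs => decide (1 < idxs.length))).map
        (fun idxs => PySem.List.pyGetD idxs (-1) 0)) with hcands
      have hImem : i ∈ cands := by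
        rw [hcands]
        refine List.mem_map.2 ⟨v, List.mem_filter.2 ⟨hvmem, hvlen⟩, ?_⟩
        rw [hv]
        exact PySem.List.pyGetD_neg_one_append_singleton _ _ _
      have hle : ∀ y ∈ cands, y ≤ i := by
        intro y hy
        obtain ⟨idxs, hidxs, rfl⟩ := List.mem_map.1 hy
        have hidxs' := (List.mem_filter.1 hidxs).1
        rcases PySem.Dict.mem_values_insert d a v idxs hidxs' with rfl | hmem
        · rw [hv, PySem.List.pyGetD_neg_one_append_singleton]
        · obtain ⟨hne, hlt⟩ := hvals idxs hmem
          rw [PySem.List.pyGetD_neg_one _ _ hne]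
          exact le_of_lt (hlt _ (List.getLast_mem hne))
      have hcalc : pvCalcEnd d' = i - 1 := by
        unfold pvCalcEnd
        obtain ⟨m, hm⟩ : ∃ m, PySem.List.max? cands (fun x => x) = some m := by
          cases hmq : PySem.List.max? cands (fun x => x) with
          | none =>
            rw [PySem.List.max?_eq_none_iff] at hmq
            rw [hmq] at hImem
            exact absurd hImem (List.not_mem_nil)
          | some m => exact ⟨m, rfl⟩
        have hmi : m = i :=
          le_antisymm (hle m (PySem.List.max?_mem hm)) (PySem.List.max?_isMax hm i hImem)
        rw [← hcands, hm, hmi]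
        rfl
      refine ⟨rfl, ?_, ?_, PySem.Dict.nodup_keys_insert _ _ _ hnd, ?_⟩
      · rw [hkeys]
        show PySem.Set.add d.keys a = (d', some a).1.keys
        rw [hd', PySem.Dict.keys_insert_of_contains d _ hc]
        simp [PySem.Set.add, PySem.Set.contains]
        rw [PySem.Dict.contains_eq_decide_mem_keys] at hc
        simpa using hc
      · rw [hsc, hc, if_pos rfl]
        exact hcalc.symm
      · intro idxs hmem
        rcases PySem.Dict.mem_values_insert d a v idxs hmem with rfl | hmem'
        · refine ⟨by simp [hv], ?_⟩
          intro j hj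
          rw [hv, hgd] at hj
          rcases List.mem_append.1 hj with hj' | hj'
          · have := hwlt j hj'; omega
          · simp at hj'; omega
        · obtain ⟨hne, hlt⟩ := hvals idxs hmem'
          exact ⟨hne, fun j hj => by have := hlt j hj; omega⟩
    · -- first visit of this address: the cut is unchanged
      have hcf : d.contains a = false := by simpa using hc
      have hgd : d.getD a [] = [] := PySem.Dict.getD_of_not_contains d _ hcf
      have hitems : (d.insert a (d.getD a [] ++ [i])).items = d.items ++ [(a, [i])] := by
        rw [hgd]
        exact PySem.Dict.items_insert_of_not_contains d _ hcf
      have hvalues : (d.insert a (d.getD a [] ++ [i])).values = d.values ++ [[i]] := by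
        simp [PySem.Dict.values, hitems]
      refine ⟨rfl, ?_, ?_, PySem.Dict.nodup_keys_insert _ _ _ hnd, ?_⟩
      · rw [hkeys, PySem.Dict.keys_insert_of_not_contains d _ hcf]
        simp [PySem.Set.add, PySem.Set.contains]
        intro hm
        exfalso
        rw [PySem.Dict.contains_eq_decide_mem_keys] at hcf
        simp at hcf
        exact hcf hm
      · rw [hsc, hcf, if_neg (by simp), hend]
        unfold pvCalcEnd
        rw [hvalues, List.filter_append]
        simp
      · intro idxs hmem
        rw [hvalues] at hmem
        rcases List.mem_append.1 hmem with hmem' | hmem'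
        · obtain ⟨hne, hlt⟩ := hvals idxs hmem'
          exact ⟨hne, fun j hj => by have := hlt j hj; omega⟩
        · simp at hmem'
          subst hmem'
          exact ⟨by simp, fun j hj => by simp at hj; omega⟩

theorem pvInv_fold (hops : List (List (String × String))) (i : Int)
    (stA : PySem.Set String × Option String × Int)
    (stB : PySem.Dict String (List Int) × Option String) (h : pvInv stA stB i) :
    pvInv ((PySem.List.enumerate hops i).foldl pvStepA stA)
      ((PySem.List.enumerate hops i).foldl pvStepB stB) (i + hops.length) := by
  induction hops generalizing i stA stB with
  | nil => simpa using h
  | cons x xs ih =>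
    rw [PySem.List.enumerate_cons]
    simp only [List.foldl_cons, List.length_cons]
    have heq : i + ((xs.length + 1 : Nat) : Int) = (i + 1) + xs.length := by push_cast; ring
    rw [heq]
    exact ih (i + 1) _ _ (pvInv_step stA stB i x h)

-- ===== VERDICT (by name: the statement is the Claim_ definition above) =====
theorem remove_loops_spec : Claim_equal_remove_loops := by
  intro hopslist _ _
  unfold Spec_remove_loops remove_loops remove_loops_alt
  have h0 : pvInv (PySem.Set.empty, none, 0) (PySem.Dict.empty, none) 1 := by
    refine ⟨rfl, rfl, by decide, by decide, by simp [PySem.Dict.values, PySem.Dict.empty]⟩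
  have h := pvInv_fold hopslist.reverse 1 _ _ h0
  obtain ⟨-, -, hend, -, -⟩ := h
  simp only [hend]
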